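-- pv_equiv track=rewrite | github.com/WDAqua/ReMatch | splitter.py | __old_split__
-- ===== SOURCE A (Python) =====
-- def __old_split__(question):
--     words = question.split()
--     combinations = [w for w in words]
--     for i in range(len(words)-1):
--         combinations.append(words[i]+' '+words[i+1])
--     for i in range(len(words)-2):
--         combinations.append(words[i]+' '+words[i+1]+' '+words[i+2])
--     return combinations
-- ===== SOURCE B (Python) =====
-- def __old_split__(question):
--     unis, bis, tris = [], [], []
--     prev1 = prev2 = None
--     for w in question.split():
--         unis.append(w)
--         if prev1 is not None:
--             bis.append(prev1 + ' ' + w)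
--             if prev2 is not None:
--                 tris.append(prev2 + ' ' + prev1 + ' ' + w)
--         prev2, prev1 = prev1, w
--     return unis + bis + tris
-- ===== Notes on version B (the rewrite author's own statement) =====
-- stated objective: alternative
-- what changed: A's three separate indexed passes over the word list are replaced by a single pass with a sliding two-word window (prev2, prev1) that accumulates unigrams, bigrams and trigrams simultaneously and concatenates the three accumulators at the end.
import Mathlib
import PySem

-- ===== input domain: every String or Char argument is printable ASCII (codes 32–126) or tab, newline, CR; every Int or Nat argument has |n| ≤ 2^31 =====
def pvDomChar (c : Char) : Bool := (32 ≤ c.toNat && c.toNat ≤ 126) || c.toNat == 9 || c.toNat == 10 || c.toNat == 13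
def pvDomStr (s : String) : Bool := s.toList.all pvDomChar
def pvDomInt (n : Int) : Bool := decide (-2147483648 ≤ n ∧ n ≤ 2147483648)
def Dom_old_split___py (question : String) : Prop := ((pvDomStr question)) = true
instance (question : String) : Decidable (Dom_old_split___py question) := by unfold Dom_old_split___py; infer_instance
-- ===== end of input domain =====

-- B replaces A's three indexed passes by a single sliding-window pass accumulating all three gram lists; objective: alternative.

-- ===== PORT A =====
-- Python indexing words[i] is always in range inside A's loops; PySem.List.pyGetD with default "" is exact there.
def old_split___py (question : String) : List String :=
  let words := PySem.Str.split₀ question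
  let combinations := words.map (fun w => w)
  let combinations := (PySem.List.pyRange 0 ((words.length : Int) - 1) 1).foldl
    (fun acc i => acc ++ [PySem.List.pyGetD words i "" ++ " " ++ PySem.List.pyGetD words (i + 1) ""])
    combinations
  let combinations := (PySem.List.pyRange 0 ((words.length : Int) - 2) 1).foldl
    (fun acc i => acc ++ [PySem.List.pyGetD words i "" ++ " " ++ PySem.List.pyGetD words (i + 1) ""
      ++ " " ++ PySem.List.pyGetD words (i + 2) ""])
    combinations
  combinations

-- ===== PORT B =====
-- State of B's single loop: (unis, bis, tris, prev1, prev2).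
def pvStepB (st : List String × List String × List String × Option String × Option String)
    (w : String) : List String × List String × List String × Option String × Option String :=
  let (unis, bis, tris, prev1, prev2) := st
  let unis := unis ++ [w]
  let (bis, tris) :=
    match prev1 with
    | none => (bis, tris)
    | some p1 =>
      let bis := bis ++ [p1 ++ " " ++ w]
      match prev2 with
      | none => (bis, tris)
      | some p2 => (bis, tris ++ [p2 ++ " " ++ p1 ++ " " ++ w])
  (unis, bis, tris, some w, prev1)

def old_split___py_alt (question : String) : List String :=
  let r := (PySem.Str.split₀ question).foldl pvStepB ([], [], [], none, none)
  r.1 ++ r.2.1 ++ r.2.2.1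

-- ===== PRECONDITION & SPEC =====
def Spec_old_split___py (question : String) (out : List String) : Prop := out = old_split___py_alt question
instance (question : String) (out : List String) : Decidable (Spec_old_split___py question out) := by unfold Spec_old_split___py; infer_instance

-- ===== CLAIM (what is proved, stated in full; the proofs are below) =====
def Claim_equal_old_split___py : Prop := ∀ (question : String), Dom_old_split___py question → Spec_old_split___py question (old_split___py question)

-- ===== LEMMAS AND PROOFS =====

-- A's bigram and trigram lists, in index form.
def pvBi (ws : List String) : List String :=
  (List.range (ws.length - 1)).map (fun k => ws.getD k "" ++ " " ++ ws.getD (k + 1) "")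

def pvTri (ws : List String) : List String :=
  (List.range (ws.length - 2)).map
    (fun k => ws.getD k "" ++ " " ++ ws.getD (k + 1) "" ++ " " ++ ws.getD (k + 2) "")

theorem pv_flatMap_sing {α β : Type} (f : α → β) (l : List α) :
    List.flatMap (fun x => [f x]) l = l.map f := by
  induction l with
  | nil => rfl
  | cons a t ih => simp [List.flatMap_cons] at ih ⊢; exact ih

-- A equals ws ++ pvBi ws ++ pvTri ws.
set_option maxHeartbeats 1000000 in
theorem pv_A_char (q : String) :
    old_split___py q =
      PySem.Str.split₀ q ++ pvBi (PySem.Str.split₀ q) ++ pvTri (PySem.Str.split₀ q) := by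
  unfold old_split___py pvBi pvTri
  set ws := PySem.Str.split₀ q with hws
  simp only [PySem.List.foldl_append_eq_flatMap, pv_flatMap_sing,
    PySem.List.pyRange_one, List.map_map, List.map_id']
  have e2 : (((ws.length : Int) - 1) - 0).toNat = ws.length - 1 := by omega
  have e3 : (((ws.length : Int) - 2) - 0).toNat = ws.length - 2 := by omega
  rw [e2, e3]
  congr 1
  · congr 1
    apply List.map_congr_left
    intro k hk
    have hk1 : k + 1 < ws.length := by have := List.mem_range.mp hk; omega
    simp only [Function.comp_apply, zero_add]
    have h1 : ((k : Int) + 1) = (((k + 1 : Nat)) : Int) := by push_cast; ring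
    rw [h1, PySem.List.pyGetD_natCast, PySem.List.pyGetD_natCast]
  · apply List.map_congr_left
    intro k hk
    have hk2 : k + 2 < ws.length := by have := List.mem_range.mp hk; omega
    simp only [Function.comp_apply, zero_add]
    have h1 : ((k : Int) + 1) = (((k + 1 : Nat)) : Int) := by push_cast; ring
    have h2 : ((k : Int) + 2) = (((k + 2 : Nat)) : Int) := by push_cast; ring
    rw [h1, h2, PySem.List.pyGetD_natCast, PySem.List.pyGetD_natCast,
      PySem.List.pyGetD_natCast]

-- recursion lemmas for pvBi / pvTri
theorem pvBi_cons (a b : String) (r : List String) :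
    pvBi (a :: b :: r) = (a ++ " " ++ b) :: pvBi (b :: r) := by
  unfold pvBi
  have : (a :: b :: r).length - 1 = ((b :: r).length - 1) + 1 := by simp
  rw [this, List.range_succ_eq_map]
  simp [List.map_map, Function.comp_def]

theorem pvTri_cons (a b c : String) (r : List String) :
    pvTri (a :: b :: c :: r) = (a ++ " " ++ b ++ " " ++ c) :: pvTri (b :: c :: r) := by
  unfold pvTri
  have : (a :: b :: c :: r).length - 2 = ((b :: c :: r).length - 2) + 1 := by simp
  rw [this, List.range_succ_eq_map]
  simp [List.map_map, Function.comp_def]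

-- the loop invariant: fold from a fully-windowed state
theorem pv_fold_some (ws : List String) :
    ∀ (u b t : List String) (p q : String),
      (ws.foldl pvStepB (u, b, t, some p, some q)).1 = u ++ ws ∧
      (ws.foldl pvStepB (u, b, t, some p, some q)).2.1 = b ++ pvBi (p :: ws) ∧
      (ws.foldl pvStepB (u, b, t, some p, some q)).2.2.1 = t ++ pvTri (q :: p :: ws) := by
  induction ws with
  | nil => intro u b t p q; simp [pvBi, pvTri]
  | cons w r ih =>
    intro u b t p q
    simp only [List.foldl_cons, pvStepB]
    obtain ⟨h1, h2, h3⟩ := ih (u ++ [w]) (b ++ [p ++ " " ++ w]) (t ++ [q ++ " " ++ p ++ " " ++ w]) w p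
    refine ⟨?_, ?_, ?_⟩
    · rw [h1]; simp
    · rw [h2, pvBi_cons]; simp
    · rw [h3, pvTri_cons]; simp

theorem pv_B_char (q : String) :
    old_split___py_alt q =
      PySem.Str.split₀ q ++ pvBi (PySem.Str.split₀ q) ++ pvTri (PySem.Str.split₀ q) := by
  unfold old_split___py_alt
  cases hws : PySem.Str.split₀ q with
  | nil => simp [pvBi, pvTri]
  | cons w r =>
    cases r with
    | nil => simp [pvStepB, pvBi, pvTri]
    | cons w2 r2 =>
      simp only [List.foldl_cons, pvStepB, List.nil_append, List.cons_append]
      obtain ⟨h1, h2, h3⟩ := pv_fold_some r2 [w, w2] [w ++ " " ++ w2] [] w2 w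
      rw [h1, h2, h3, pvBi_cons]
      simp

-- ===== VERDICT (by name: the statement is the Claim_ definition above) =====
theorem old_split___py_spec : Claim_equal_old_split___py := by
  intro question _
  unfold Spec_old_split___py
  rw [pv_A_char, pv_B_char]
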